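-- pv_equiv track=rewrite | github.com/bsinghsolanki/PRR-Form-Automation | gov_QA_portal/engine/decision_engine.py | _pick_delivery
-- ===== SOURCE A (Python) =====
-- def _pick_delivery(options: list) -> str:
--     """Pick Electronic/Email delivery."""
--     targets = ["electronic", "email", "e-mail", "digital", "online"]
--
--     if options:
--         options_lower = {o.lower(): o for o in options}
--         for target in targets:
--             for opt_lower, opt_original in options_lower.items():
--                 if target in opt_lower:
--                     return opt_original
--
--     return "Electronic"
-- ===== SOURCE B (Python) =====
-- def _match_idx(key, targets):
--     i = 0
--     for t in targets:
--         if t in key: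
--             return i
--         i += 1
--     return len(targets)
--
--
-- def _pick_delivery(options: list) -> str:
--     """Pick Electronic/Email delivery (argmin over dedup dict instead of priority-ordered nested early-return)."""
--     targets = ["electronic", "email", "e-mail", "digital", "online"]
--     if not options:
--         return "Electronic"
--     options_lower = {o.lower(): o for o in options}
--     best_i, best = len(targets), "Electronic"
--     for key, orig in options_lower.items():
--         i = _match_idx(key, targets)
--         if i < best_i:
--             best_i, best = i, orig
--     return best
-- ===== Notes on version B (the rewrite author's own statement) =====
-- stated objective: alternative
-- what changed: Replaced the priority-ordered nested loops with early return by a single argmin scan over the dedup dict: each option's smallest matching target index is computed once and a running strict minimum picks the winner.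
import Mathlib
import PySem

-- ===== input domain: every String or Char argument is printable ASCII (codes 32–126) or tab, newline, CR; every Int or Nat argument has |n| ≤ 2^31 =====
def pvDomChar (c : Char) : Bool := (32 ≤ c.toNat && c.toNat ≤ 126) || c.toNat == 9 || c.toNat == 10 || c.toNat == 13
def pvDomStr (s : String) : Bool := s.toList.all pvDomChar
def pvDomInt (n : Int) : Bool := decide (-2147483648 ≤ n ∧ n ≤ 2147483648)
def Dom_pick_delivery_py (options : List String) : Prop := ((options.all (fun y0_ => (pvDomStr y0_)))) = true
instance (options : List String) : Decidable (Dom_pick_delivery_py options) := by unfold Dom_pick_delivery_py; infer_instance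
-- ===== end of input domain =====

-- B replaces A's priority-ordered nested loops (early return) by one argmin scan over the dedup dict (alternative decomposition, same cost).

-- ===== PORT A =====
def pdTargets : List String := ["electronic", "email", "e-mail", "digital", "online"]

def pick_delivery_py (options : List String) : String :=
  if options ≠ [] then
    let optionsLower : PySem.Dict String String :=
      options.foldl (fun d o => d.insert (PySem.Str.lower o) o) PySem.Dict.empty
    match pdTargets.findSome? (fun target =>
      optionsLower.items.findSome? (fun kv =>
        if PySem.Str.isIn target kv.1 then some kv.2 else none)) with
    | some r => r
    | none => "Electronic"
  else "Electronic"

-- ===== PORT B =====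
-- first index i with targets[i] a substring of key, else targets.length (Source B's _match_idx)
def pdMatchIdx (key : String) : List String → Nat
  | [] => 0
  | t :: rest => if PySem.Str.isIn t key then 0 else 1 + pdMatchIdx key rest

def pick_delivery_py_alt (options : List String) : String :=
  if options = [] then "Electronic"
  else
    let optionsLower : PySem.Dict String String :=
      options.foldl (fun d o => d.insert (PySem.Str.lower o) o) PySem.Dict.empty
    (optionsLower.items.foldl (fun acc kv =>
        let i := pdMatchIdx kv.1 pdTargets
        if i < acc.1 then (i, kv.2) else acc)
      (pdTargets.length, "Electronic")).2

-- ===== PRECONDITION & SPEC =====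
def Spec_pick_delivery_py (options : List String) (out : String) : Prop := out = pick_delivery_py_alt options
instance (options : List String) (out : String) : Decidable (Spec_pick_delivery_py options out) := by unfold Spec_pick_delivery_py; infer_instance

-- ===== CLAIM (what is proved, stated in full; the proofs are below) =====
def Claim_equal_pick_delivery_py : Prop := ∀ (options : List String), Dom_pick_delivery_py options → Spec_pick_delivery_py options (pick_delivery_py options)

-- ===== LEMMAS AND PROOFS =====

-- once the accumulator index is 0, nothing can beat it
theorem pd_fold_zero (m : String × String → Nat) (L : List (String × String)) (w : String) :
    (L.foldl (fun (acc : Nat × String) kv =>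
      if m kv < acc.1 then (m kv, kv.2) else acc) (0, w)) = (0, w) := by
  induction L with
  | nil => rfl
  | cons kv L ih => simpa using ih

-- no element satisfies p: the fold with indices (if p then 0 else 1+m) is the fold with m, shifted by 1
theorem pd_fold_shift (p : String × String → Bool) (m : String × String → Nat)
    (L : List (String × String)) (h : ∀ kv ∈ L, p kv = false) (b : Nat) (v : String) :
    (L.foldl (fun (acc : Nat × String) kv =>
      if (if p kv then 0 else 1 + m kv) < acc.1 then ((if p kv then 0 else 1 + m kv), kv.2) else acc) (b + 1, v))
    = ((L.foldl (fun (acc : Nat × String) kv =>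
        if m kv < acc.1 then (m kv, kv.2) else acc) (b, v)).1 + 1,
       (L.foldl (fun (acc : Nat × String) kv =>
        if m kv < acc.1 then (m kv, kv.2) else acc) (b, v)).2) := by
  induction L generalizing b v with
  | nil => rfl
  | cons kv L ih =>
    have hkv := h kv (by simp)
    have hrest : ∀ q ∈ L, p q = false := fun q hq => h q (by simp [hq])
    simp only [List.foldl_cons, hkv, Bool.false_eq_true, if_false]
    by_cases hlt : m kv < b
    · rw [if_pos (by omega : 1 + m kv < b + 1)]
      rw [show 1 + m kv = m kv + 1 from by omega]
      rw [ih hrest (m kv) kv.2, if_pos hlt]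
    · rw [if_neg (by omega : ¬ 1 + m kv < b + 1), ih hrest b v, if_neg hlt]

-- some element satisfies p: the fold returns the first such element's value
theorem pd_fold_hit (p : String × String → Bool) (m : String × String → Nat)
    (L : List (String × String)) (v : String)
    (h : L.findSome? (fun kv => if p kv then some kv.2 else none) = some v)
    (b : Nat) (hb : 1 ≤ b) (w : String) :
    (L.foldl (fun (acc : Nat × String) kv =>
      if (if p kv then 0 else 1 + m kv) < acc.1 then ((if p kv then 0 else 1 + m kv), kv.2) else acc) (b, w)).2 = v := by
  induction L generalizing b w with
  | nil => simp at h
  | cons kv L ih =>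
    by_cases hp : p kv = true
    · have hv : kv.2 = v := by simpa [List.findSome?_cons, hp] using h
      simp only [List.foldl_cons, hp, if_true]
      rw [if_pos (by omega : 0 < b)]
      exact (congrArg Prod.snd (pd_fold_zero (fun kv => if p kv then 0 else 1 + m kv) L kv.2)).trans hv
    · have hp' : p kv = false := by simpa using hp
      have h' : L.findSome? (fun kv => if p kv then some kv.2 else none) = some v := by
        simpa [List.findSome?_cons, hp'] using h
      simp only [List.foldl_cons, hp', Bool.false_eq_true, if_false]
      by_cases hlt : 1 + m kv < b
      · rw [if_pos hlt]; exact ih h' _ (by omega) _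
      · rw [if_neg hlt]; exact ih h' _ hb _

-- main bridge: A's nested early-return search equals B's argmin fold, for any item list
theorem pd_main (ts : List String) (L : List (String × String)) :
    (match ts.findSome? (fun target =>
        L.findSome? (fun kv => if PySem.Str.isIn target kv.1 then some kv.2 else none)) with
      | some r => r
      | none => "Electronic")
    = (L.foldl (fun (acc : Nat × String) kv =>
        let i := pdMatchIdx kv.1 ts
        if i < acc.1 then (i, kv.2) else acc) (ts.length, "Electronic")).2 := by
  induction ts with
  | nil =>
    exact (congrArg Prod.snd (pd_fold_zero (fun kv => pdMatchIdx kv.1 []) L "Electronic")).symm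
  | cons t rest ih =>
    rw [List.findSome?_cons]
    cases hfs : L.findSome? (fun kv => if PySem.Str.isIn t kv.1 then some kv.2 else none) with
    | some v =>
      exact (pd_fold_hit (fun kv => PySem.Str.isIn t kv.1) (fun kv => pdMatchIdx kv.1 rest)
        L v hfs (rest.length + 1) (by omega) "Electronic").symm
    | none =>
      have hall : ∀ kv ∈ L, PySem.Str.isIn t kv.1 = false := by
        intro kv hkv
        have hnone := List.findSome?_eq_none_iff.mp hfs kv hkv
        cases hc : PySem.Str.isIn t kv.1 with
        | false => rfl
        | true => rw [hc] at hnone; simp at hnone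
      exact ih.trans (congrArg Prod.snd (pd_fold_shift (fun kv => PySem.Str.isIn t kv.1)
        (fun kv => pdMatchIdx kv.1 rest) L hall rest.length "Electronic")).symm

-- ===== VERDICT (by name: the statement is the Claim_ definition above) =====
theorem pick_delivery_py_spec : Claim_equal_pick_delivery_py := by
  intro options _
  unfold Spec_pick_delivery_py pick_delivery_py pick_delivery_py_alt
  by_cases hopt : options = []
  · simp [hopt]
  · simp only [hopt, ne_eq, not_false_eq_true, if_true, if_false]
    exact pd_main pdTargets _
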